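-- pv_equiv track=rewrite | github.com/awphi/ecs-summative | payload.py | decimalToVector
-- ===== SOURCE A (Python) =====
-- def decimalToVector(i, l):
--     vec = [0] * l
--     c = 0
--
--     while i > 0 and c < len(vec):
--         vec[-(c + 1)] = i % 2
--         i //= 2
--         c += 1
--
--     return vec
-- ===== SOURCE B (Python) =====
-- def decimalToVector(i, l):
--     if i <= 0:
--         return [0] * l
--     return [(i >> k) & 1 for k in range(l - 1, -1, -1)]
-- ===== Notes on version B (the rewrite author's own statement) =====
-- stated objective: idiomatic
-- what changed: Replaces A's destructive while-loop that peels bits off i with %2 and //=2 while mutating vec from the right by a single list comprehension that computes each output bit independently as (i >> k) & 1 over range(l-1, -1, -1), with a guard returning [0]*l for i <= 0.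
import Mathlib
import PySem

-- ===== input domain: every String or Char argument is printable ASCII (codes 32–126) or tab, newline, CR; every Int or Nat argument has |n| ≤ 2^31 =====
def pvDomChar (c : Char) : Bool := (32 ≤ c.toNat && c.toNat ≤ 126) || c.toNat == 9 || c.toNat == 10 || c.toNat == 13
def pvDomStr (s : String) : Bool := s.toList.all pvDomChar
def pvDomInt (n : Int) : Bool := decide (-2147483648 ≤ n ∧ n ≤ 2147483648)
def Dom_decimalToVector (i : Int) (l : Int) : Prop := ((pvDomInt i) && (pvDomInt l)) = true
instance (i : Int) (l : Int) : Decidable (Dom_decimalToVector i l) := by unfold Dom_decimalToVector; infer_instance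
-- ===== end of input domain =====

-- B replaces A's destructive low-to-high bit-extraction loop by a per-position
-- comprehension over range(l-1, -1, -1) computing each bit directly (objective: idiomatic).

-- ===== PORT A =====
-- the while loop: state (vec, i, c); vec[-(c+1)] = i % 2; i //= 2; c += 1
def decimalToVectorLoop (vec : List Int) (i : Int) (c : Nat) : List Int :=
  if h : 0 < i ∧ c < vec.length then
    decimalToVectorLoop (PySem.List.pySetD vec (-((c : Int) + 1)) (PySem.Int.mod i 2))
      (PySem.Int.floordiv i 2) (c + 1)
  else vec
termination_by vec.length - c
decreasing_by simp [PySem.List.length_pySetD]; omega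

def decimalToVector (i : Int) (l : Int) : List Int :=
  -- vec = [0] * l  (empty for l ≤ 0, hence l.toNat)
  decimalToVectorLoop (List.replicate l.toNat 0) i 0

-- ===== PORT B =====
-- Python (i >> k) & 1 == (i // 2**k) % 2 for ints; every k produced by this range is ≥ 0,
-- so k.toNat is exact.
def decimalToVector_alt (i : Int) (l : Int) : List Int :=
  if i ≤ 0 then List.replicate l.toNat 0   -- [0] * l
  else (PySem.List.pyRange (l - 1) (-1) (-1)).map
    (fun k => PySem.Int.mod (PySem.Int.floordiv i (2 ^ k.toNat)) 2)

-- ===== PRECONDITION & SPEC =====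
def Spec_decimalToVector (i : Int) (l : Int) (out : List Int) : Prop := out = decimalToVector_alt i l
instance (i : Int) (l : Int) (out : List Int) : Decidable (Spec_decimalToVector i l out) := by unfold Spec_decimalToVector; infer_instance

-- ===== CLAIM (what is proved, stated in full; the proofs are below) =====
def Claim_equal_decimalToVector : Prop := ∀ (i : Int) (l : Int), Dom_decimalToVector i l → Spec_decimalToVector i l (decimalToVector i l)

-- ===== LEMMAS AND PROOFS =====

-- reference shape of the loop's effect: write the low bits of m into pre from the right
def hFill (m : Nat) (pre : List Int) : List Int :=
  if m = 0 ∨ pre = [] then pre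
  else hFill (m / 2) (pre.take (pre.length - 1)) ++ [((m % 2 : Nat) : Int)]
termination_by m
decreasing_by exact Nat.div_lt_self (Nat.pos_of_ne_zero (by tauto)) (by omega)

-- writing at python index -(c+1) in (pre ++ suf) with suf.length = c hits the last slot of pre
lemma pySetD_neg (pre suf : List Int) (v : Int) (hp : pre ≠ []) :
    PySem.List.pySetD (pre ++ suf) (-((suf.length : Int) + 1)) v
      = (pre.take (pre.length - 1) ++ [v]) ++ suf := by
  have hp' : 0 < pre.length := List.length_pos_iff.mpr hp
  have h1 : ¬ (0 ≤ -((suf.length : Int) + 1)) := by omega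
  have h2 : -(((pre ++ suf).length : Int)) ≤ -((suf.length : Int) + 1) := by
    simp only [List.length_append]; push_cast; omega
  have h3 : (pre ++ suf).length - (-(-((suf.length : Int) + 1))).toNat = pre.length - 1 := by
    simp only [List.length_append]; omega
  simp only [PySem.List.pySetD, PySem.List.pySet?, PySem.List.pyIdx?, if_neg h1, if_pos h2,
    Option.map_some, Option.getD_some, h3]
  rw [List.set_eq_take_append_cons_drop, if_pos (by simp; omega)]
  rw [List.take_append_of_le_length (by omega), List.drop_append_of_le_length (by omega)]
  have hd : pre.drop (pre.length - 1 + 1) = [] := List.drop_eq_nil_of_le (by omega)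
  simp [hd, List.append_assoc]

lemma loop_eq_hFill (m : Nat) : ∀ (pre suf : List Int),
    decimalToVectorLoop (pre ++ suf) (m : Int) suf.length = hFill m pre ++ suf := by
  induction m using Nat.strong_induction_on with
  | _ m IH =>
    intro pre suf
    rw [decimalToVectorLoop, hFill]
    by_cases hm : m = 0 ∨ pre = []
    · have hcond : ¬ (0 < ((m : Int)) ∧ suf.length < (pre ++ suf).length) := by
        rcases hm with hm | hm <;> subst hm <;> simp
      rw [dif_neg hcond, if_pos hm]
    · rw [not_or] at hm
      obtain ⟨hm0, hpre⟩ := hm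
      have hp' : 0 < pre.length := List.length_pos_iff.mpr hpre
      have hcond : 0 < ((m : Int)) ∧ suf.length < (pre ++ suf).length :=
        ⟨by exact_mod_cast Nat.pos_of_ne_zero hm0, by simp; omega⟩
      rw [dif_pos hcond, if_neg (by tauto)]
      have emod : PySem.Int.mod (m : Int) 2 = ((m % 2 : Nat) : Int) := by
        rw [PySem.Int.mod_eq_emod_of_pos (by norm_num)]; omega
      have ediv : PySem.Int.floordiv (m : Int) 2 = ((m / 2 : Nat) : Int) := by
        rw [PySem.Int.floordiv_eq_ediv_of_pos (by norm_num)]; omega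
      rw [emod, ediv, pySetD_neg pre suf _ hpre, List.append_assoc]
      have hlen : suf.length + 1 = (((m % 2 : Nat) : Int) :: suf).length := by simp
      rw [List.singleton_append, hlen,
        IH (m / 2) (Nat.div_lt_self (Nat.pos_of_ne_zero hm0) (by omega)) (pre.take (pre.length - 1))]
      simp [List.append_assoc]

lemma hFill_replicate (n : Nat) : ∀ (m : Nat),
    hFill m (List.replicate n 0)
      = (List.range n).reverse.map (fun k => ((m / 2 ^ k % 2 : Nat) : Int)) := by
  induction n with
  | zero => intro m; rw [hFill]; simp
  | succ n IH =>
    intro m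
    rw [hFill]
    by_cases hm0 : m = 0
    · subst hm0
      simp
    · rw [if_neg (by simp [hm0]), List.length_replicate]
      have ht : (List.replicate (n + 1) (0 : Int)).take (n + 1 - 1) = List.replicate n 0 := by
        simp [List.take_replicate]
      rw [ht, IH]
      rw [List.range_succ_eq_map, List.reverse_cons, List.map_append, ← List.map_reverse,
        List.map_map]
      congr 1
      · congr 1
        funext k
        simp only [Function.comp_apply]
        congr 1
        rw [Nat.div_div_eq_div_mul, Nat.mul_comm, ← pow_succ]
      · simp

lemma reverse_range_map {α : Type} (n : Nat) (f : Nat → α) :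
    (List.range n).reverse.map f = (List.range n).map (fun k => f (n - 1 - k)) := by
  apply List.ext_getElem
  · simp
  · intro j h1 h2
    simp [List.getElem_reverse]

-- ===== VERDICT (by name: the statement is the Claim_ definition above) =====
theorem decimalToVector_spec : Claim_equal_decimalToVector := by
  intro i l _
  unfold Spec_decimalToVector decimalToVector decimalToVector_alt
  by_cases hi : i ≤ 0
  · rw [decimalToVectorLoop, dif_neg (by omega), if_pos hi]
  · obtain ⟨m, hm⟩ : ∃ m : Nat, i = (m : Int) := ⟨i.toNat, by omega⟩
    subst hm
    rw [if_neg hi]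
    have hA := loop_eq_hFill m (List.replicate l.toNat 0) []
    simp only [List.append_nil, List.length_nil] at hA
    rw [hA, hFill_replicate, reverse_range_map, PySem.List.pyRange_neg_one, List.map_map]
    have hab : (l - 1 - (-1)).toNat = l.toNat := by omega
    rw [hab]
    apply List.map_congr_left
    intro k hk
    rw [List.mem_range] at hk
    simp only [Function.comp_apply]
    have hkt : ((l - 1 - (k : Int)).toNat) = l.toNat - 1 - k := by omega
    rw [hkt, PySem.Int.mod_eq_emod_of_pos (by norm_num),
      PySem.Int.floordiv_eq_ediv_of_pos (by positivity)]
    have h2 : ((2 : Int) ^ (l.toNat - 1 - k)) = ((2 ^ (l.toNat - 1 - k) : Nat) : Int) := by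
      push_cast; ring
    rw [h2, ← Int.natCast_div]
    omega
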